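-- pv_equiv track=rewrite | github.com/hebbarp/bru-agent | bru_agent/skills/implementations/pdf_generator.py | _is_markdown
-- ===== SOURCE A (Python) =====
-- def _is_markdown(content: str) -> bool:
--     """Detect if content contains markdown formatting."""
--     markdown_indicators = [
--         '# ',      # Headers
--         '## ',
--         '### ',
--         '**',      # Bold
--         '__',
--         '*',       # Italic (single)
--         '_',
--         '```',     # Code blocks
--         '`',       # Inline code
--         '- ',      # Unordered lists
--         '* ',
--         '1. ',     # Ordered lists
--         '> ',      # Blockquotes
--         '[',       # Links
--         '![',      # Images
--         '|',       # Tables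
--     ]
--
--     for indicator in markdown_indicators:
--         if indicator in content:
--             return True
--     return False
-- ===== SOURCE B (Python) =====
-- def _is_markdown(content: str) -> bool:
--     """Detect markdown formatting with one left-to-right scan of content."""
--     n = len(content)
--     for i in range(n):
--         c = content[i]
--         if c in '*_`[|':
--             return True
--         if c in '#->' and i + 1 < n and content[i + 1] == ' ':
--             return True
--         if c == '1' and i + 2 < n and content[i + 1] == '.' and content[i + 2] == ' ':
--             return True
--     return False
-- ===== Notes on version B (the rewrite author's own statement) =====
-- stated objective: alternative
-- what changed: Replaces 16 independent substring scans over the content with a single left-to-right scan that classifies each character (with at most two characters of lookahead) against the 9 non-redundant indicator patterns, the other 7 being subsumed by them.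
import Mathlib
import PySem

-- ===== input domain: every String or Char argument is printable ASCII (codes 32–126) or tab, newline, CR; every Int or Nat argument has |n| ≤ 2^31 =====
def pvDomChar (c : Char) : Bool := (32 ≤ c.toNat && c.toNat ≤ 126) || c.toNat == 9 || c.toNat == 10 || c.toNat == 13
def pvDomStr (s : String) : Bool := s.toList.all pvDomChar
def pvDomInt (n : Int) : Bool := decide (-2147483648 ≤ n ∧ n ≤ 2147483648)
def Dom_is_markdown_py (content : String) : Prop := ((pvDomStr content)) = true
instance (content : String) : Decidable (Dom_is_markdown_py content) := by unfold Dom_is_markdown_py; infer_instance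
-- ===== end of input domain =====

-- B replaces A's 16 independent substring scans by one left-to-right scan with two chars of lookahead (alternative decomposition, same result).

-- ===== PORT A =====
def is_markdown_py (content : String) : Bool :=
  -- for indicator in markdown_indicators: if indicator in content: return True; return False
  ["# ", "## ", "### ", "**", "__", "*", "_", "```", "`", "- ", "* ", "1. ", "> ", "[", "![", "|"].any
    (fun indicator => PySem.Str.isIn indicator content)

-- ===== PORT B =====
-- the scan of Source B: at each position test the character, reading content[i+1]/content[i+2] as head? of the remainder
def isMarkdownScan : List Char → Bool
  | [] => false
  | c :: rest =>
    if c = '*' ∨ c = '_' ∨ c = '`' ∨ c = '[' ∨ c = '|' then true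
    else if (c = '#' ∨ c = '-' ∨ c = '>') ∧ rest.head? = some ' ' then true
    else if c = '1' ∧ rest.head? = some '.' ∧ rest.tail.head? = some ' ' then true
    else isMarkdownScan rest

def is_markdown_py_alt (content : String) : Bool := isMarkdownScan content.toList

-- ===== PRECONDITION & SPEC =====
def Spec_is_markdown_py (content : String) (out : Bool) : Prop := out = is_markdown_py_alt content
instance (content : String) (out : Bool) : Decidable (Spec_is_markdown_py content out) := by unfold Spec_is_markdown_py; infer_instance

-- ===== CLAIM (what is proved, stated in full; the proofs are below) =====
def Claim_equal_is_markdown_py : Prop := ∀ (content : String), Dom_is_markdown_py content → Spec_is_markdown_py content (is_markdown_py content)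

-- ===== LEMMAS AND PROOFS =====

-- the 9 non-redundant patterns (each of A's 16 contains one of these), as a predicate on the char list
def P9 (l : List Char) : Prop :=
  ['#', ' '] <:+: l ∨ ['*'] <:+: l ∨ ['_'] <:+: l ∨ ['`'] <:+: l ∨
  ['-', ' '] <:+: l ∨ ['1', '.', ' '] <:+: l ∨ ['>', ' '] <:+: l ∨ ['['] <:+: l ∨ ['|'] <:+: l

lemma prefix1 (a c : Char) (l : List Char) : [a] <+: c :: l ↔ c = a := by
  simp [List.cons_prefix_cons, eq_comm]

lemma prefix2 (a b c : Char) (l : List Char) : [a, b] <+: c :: l ↔ c = a ∧ l.head? = some b := by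
  cases l <;> simp [List.cons_prefix_cons, eq_comm]

lemma prefix3 (a b d c : Char) (l : List Char) :
    [a, b, d] <+: c :: l ↔ c = a ∧ l.head? = some b ∧ l.tail.head? = some d := by
  cases l with
  | nil => simp [List.cons_prefix_cons]
  | cons x t => cases t <;> simp [List.cons_prefix_cons, eq_comm]

lemma scan_iff (l : List Char) : isMarkdownScan l = true ↔ P9 l := by
  induction l with
  | nil => simp [isMarkdownScan, P9]
  | cons c rest ih =>
    rw [isMarkdownScan]
    split_ifs with h1 h2 h3
    · refine iff_of_true rfl ?_
      unfold P9
      rcases h1 with rfl | rfl | rfl | rfl | rfl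
      · exact Or.inr (Or.inl ⟨[], rest, rfl⟩)
      · exact Or.inr (Or.inr (Or.inl ⟨[], rest, rfl⟩))
      · exact Or.inr (Or.inr (Or.inr (Or.inl ⟨[], rest, rfl⟩)))
      · exact Or.inr (Or.inr (Or.inr (Or.inr (Or.inr (Or.inr (Or.inr (Or.inl ⟨[], rest, rfl⟩)))))))
      · exact Or.inr (Or.inr (Or.inr (Or.inr (Or.inr (Or.inr (Or.inr (Or.inr ⟨[], rest, rfl⟩)))))))
    · refine iff_of_true rfl ?_
      unfold P9
      obtain ⟨hc, hh⟩ := h2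
      cases rest with
      | nil => simp at hh
      | cons d t =>
        simp only [List.head?_cons, Option.some.injEq] at hh
        subst hh
        rcases hc with rfl | rfl | rfl
        · exact Or.inl ⟨[], t, rfl⟩
        · exact Or.inr (Or.inr (Or.inr (Or.inr (Or.inl ⟨[], t, rfl⟩))))
        · exact Or.inr (Or.inr (Or.inr (Or.inr (Or.inr (Or.inr (Or.inl ⟨[], t, rfl⟩))))))
    · refine iff_of_true rfl ?_
      unfold P9
      obtain ⟨rfl, hh, ht⟩ := h3
      cases rest with
      | nil => simp at hh
      | cons d t =>
        simp only [List.head?_cons, Option.some.injEq] at hh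
        subst hh
        cases t with
        | nil => simp at ht
        | cons e u =>
          simp only [List.tail_cons, List.head?_cons, Option.some.injEq] at ht
          subst ht
          exact Or.inr (Or.inr (Or.inr (Or.inr (Or.inr (Or.inl ⟨[], u, rfl⟩)))))
    · rw [ih]
      unfold P9
      simp only [List.infix_cons_iff, prefix1, prefix2, prefix3]
      constructor
      · rintro (h | h | h | h | h | h | h | h | h)
        · exact Or.inl (Or.inr h)
        · exact Or.inr (Or.inl (Or.inr h))
        · exact Or.inr (Or.inr (Or.inl (Or.inr h)))
        · exact Or.inr (Or.inr (Or.inr (Or.inl (Or.inr h))))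
        · exact Or.inr (Or.inr (Or.inr (Or.inr (Or.inl (Or.inr h)))))
        · exact Or.inr (Or.inr (Or.inr (Or.inr (Or.inr (Or.inl (Or.inr h))))))
        · exact Or.inr (Or.inr (Or.inr (Or.inr (Or.inr (Or.inr (Or.inl (Or.inr h)))))))
        · exact Or.inr (Or.inr (Or.inr (Or.inr (Or.inr (Or.inr (Or.inr (Or.inl (Or.inr h))))))))
        · exact Or.inr (Or.inr (Or.inr (Or.inr (Or.inr (Or.inr (Or.inr (Or.inr (Or.inr h))))))))
      · rintro (h | h | h | h | h | h | h | h | h) <;> rcases h with hp | h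
        · exact absurd ⟨Or.inl hp.1, hp.2⟩ h2
        · exact Or.inl h
        · exact absurd (Or.inl hp) h1
        · exact Or.inr (Or.inl h)
        · exact absurd (Or.inr (Or.inl hp)) h1
        · exact Or.inr (Or.inr (Or.inl h))
        · exact absurd (Or.inr (Or.inr (Or.inl hp))) h1
        · exact Or.inr (Or.inr (Or.inr (Or.inl h)))
        · exact absurd ⟨Or.inr (Or.inl hp.1), hp.2⟩ h2
        · exact Or.inr (Or.inr (Or.inr (Or.inr (Or.inl h))))
        · exact absurd hp h3
        · exact Or.inr (Or.inr (Or.inr (Or.inr (Or.inr (Or.inl h)))))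
        · exact absurd ⟨Or.inr (Or.inr hp.1), hp.2⟩ h2
        · exact Or.inr (Or.inr (Or.inr (Or.inr (Or.inr (Or.inr (Or.inl h))))))
        · exact absurd (Or.inr (Or.inr (Or.inr (Or.inl hp)))) h1
        · exact Or.inr (Or.inr (Or.inr (Or.inr (Or.inr (Or.inr (Or.inr (Or.inl h)))))))
        · exact absurd (Or.inr (Or.inr (Or.inr (Or.inr hp)))) h1
        · exact Or.inr (Or.inr (Or.inr (Or.inr (Or.inr (Or.inr (Or.inr (Or.inr h)))))))

lemma A_iff (s : String) : is_markdown_py s = true ↔ P9 s.toList := by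
  simp only [is_markdown_py, List.any_eq_true, List.mem_cons, List.not_mem_nil, or_false,
    PySem.Str.isIn_iff_infix, P9]
  constructor
  · rintro ⟨ind, hmem, hinf⟩
    rcases hmem with rfl | rfl | rfl | rfl | rfl | rfl | rfl | rfl | rfl | rfl | rfl | rfl | rfl | rfl | rfl | rfl
    · exact Or.inl ((by decide : ['#', ' '] <:+: "# ".toList).trans hinf)
    · exact Or.inl ((by decide : ['#', ' '] <:+: "## ".toList).trans hinf)
    · exact Or.inl ((by decide : ['#', ' '] <:+: "### ".toList).trans hinf)
    · exact Or.inr (Or.inl ((by decide : ['*'] <:+: "**".toList).trans hinf))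
    · exact Or.inr (Or.inr (Or.inl ((by decide : ['_'] <:+: "__".toList).trans hinf)))
    · exact Or.inr (Or.inl ((by decide : ['*'] <:+: "*".toList).trans hinf))
    · exact Or.inr (Or.inr (Or.inl ((by decide : ['_'] <:+: "_".toList).trans hinf)))
    · exact Or.inr (Or.inr (Or.inr (Or.inl ((by decide : ['`'] <:+: "```".toList).trans hinf))))
    · exact Or.inr (Or.inr (Or.inr (Or.inl ((by decide : ['`'] <:+: "`".toList).trans hinf))))
    · exact Or.inr (Or.inr (Or.inr (Or.inr (Or.inl ((by decide : ['-', ' '] <:+: "- ".toList).trans hinf)))))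
    · exact Or.inr (Or.inl ((by decide : ['*'] <:+: "* ".toList).trans hinf))
    · exact Or.inr (Or.inr (Or.inr (Or.inr (Or.inr (Or.inl ((by decide : ['1', '.', ' '] <:+: "1. ".toList).trans hinf))))))
    · exact Or.inr (Or.inr (Or.inr (Or.inr (Or.inr (Or.inr (Or.inl ((by decide : ['>', ' '] <:+: "> ".toList).trans hinf)))))))
    · exact Or.inr (Or.inr (Or.inr (Or.inr (Or.inr (Or.inr (Or.inr (Or.inl ((by decide : ['['] <:+: "[".toList).trans hinf))))))))
    · exact Or.inr (Or.inr (Or.inr (Or.inr (Or.inr (Or.inr (Or.inr (Or.inl ((by decide : ['['] <:+: "![".toList).trans hinf))))))))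
    · exact Or.inr (Or.inr (Or.inr (Or.inr (Or.inr (Or.inr (Or.inr (Or.inr ((by decide : ['|'] <:+: "|".toList).trans hinf))))))))
  · rintro (h | h | h | h | h | h | h | h | h)
    · exact ⟨"# ", by tauto, (by decide : "# ".toList <:+: ['#', ' ']).trans h⟩
    · exact ⟨"*", by tauto, (by decide : "*".toList <:+: ['*']).trans h⟩
    · exact ⟨"_", by tauto, (by decide : "_".toList <:+: ['_']).trans h⟩
    · exact ⟨"`", by tauto, (by decide : "`".toList <:+: ['`']).trans h⟩
    · exact ⟨"- ", by tauto, (by decide : "- ".toList <:+: ['-', ' ']).trans h⟩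
    · exact ⟨"1. ", by tauto, (by decide : "1. ".toList <:+: ['1', '.', ' ']).trans h⟩
    · exact ⟨"> ", by tauto, (by decide : "> ".toList <:+: ['>', ' ']).trans h⟩
    · exact ⟨"[", by tauto, (by decide : "[".toList <:+: ['[']).trans h⟩
    · exact ⟨"|", by tauto, (by decide : "|".toList <:+: ['|']).trans h⟩

-- ===== VERDICT (by name: the statement is the Claim_ definition above) =====
theorem is_markdown_py_spec : Claim_equal_is_markdown_py := by
  intro content _
  unfold Spec_is_markdown_py is_markdown_py_alt
  exact Bool.eq_iff_iff.mpr ((A_iff content).trans (scan_iff content.toList).symm)
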